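-- pv_equiv track=rewrite | github.com/matirowensztein/practicas-ip | ROWEN/parciales/Parcial4.py | ap_antes_corte
-- ===== SOURCE A (Python) =====
-- def ap_antes_corte(c: str, s: str) -> int:
--     cont_apar: int = 0
--     saldo_tot: int = 0
--     fin_programa: bool = False
--
--     for l in s:
--         if not fin_programa:
--             if c == l:
--                 cont_apar += 1
--
--             if l == "x" or (l == "v" and saldo_tot < 56):
--                 fin_programa = True
--             elif l == "r":
--                 saldo_tot += 350
--             elif l == "v":
--                 saldo_tot -= 56
--
--     return cont_apar
-- ===== SOURCE B (Python) =====
-- def ap_antes_corte(c: str, s: str) -> int: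
--     # Pass 1: track only saldo to find the cutoff index (first 'x', or 'v' with saldo < 56).
--     saldo = 0
--     cut = None
--     for i, l in enumerate(s):
--         if l == "x" or (l == "v" and saldo < 56):
--             cut = i
--             break
--         if l == "r":
--             saldo += 350
--         elif l == "v":
--             saldo -= 56
--     # Pass 2: count occurrences of c in the prefix up to and including the cutoff char.
--     prefix = s if cut is None else s[:cut + 1]
--     return sum(1 for l in prefix if l == c)
-- ===== Notes on version B (the rewrite author's own statement) =====
-- stated objective: simpler
-- what changed: Single fold carrying (count, saldo, flag) replaced by a two-pass decomposition: first a loop tracking only saldo to locate the cutoff index, then a plain count of c over the prefix up to the cutoff.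
import Mathlib
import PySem

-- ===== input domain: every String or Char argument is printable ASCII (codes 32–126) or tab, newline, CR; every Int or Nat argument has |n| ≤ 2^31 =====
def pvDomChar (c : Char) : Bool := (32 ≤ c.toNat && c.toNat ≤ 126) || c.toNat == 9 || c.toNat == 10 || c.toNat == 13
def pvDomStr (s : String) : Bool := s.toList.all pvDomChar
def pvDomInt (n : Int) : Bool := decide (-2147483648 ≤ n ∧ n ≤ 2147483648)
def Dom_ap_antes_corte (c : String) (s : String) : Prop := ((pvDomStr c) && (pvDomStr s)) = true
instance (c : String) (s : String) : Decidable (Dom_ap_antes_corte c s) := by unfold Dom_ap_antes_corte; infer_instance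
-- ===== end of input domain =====

-- B replaces A's single fold over (count, saldo, flag) by a two-pass decomposition
-- (find the cutoff index tracking only saldo, then count c in the prefix); objective: simpler.


-- ===== PORT A =====
-- A's single loop: state (cont_apar, saldo_tot, fin_programa), branches in source order.
def apAStep (c : String) (st : Int × Int × Bool) (l : Char) : Int × Int × Bool :=
  if !st.2.2 then
    let cont := if c == String.mk [l] then st.1 + 1 else st.1
    if l == 'x' || (l == 'v' && st.2.1 < 56) then (cont, st.2.1, true)
    else if l == 'r' then (cont, st.2.1 + 350, st.2.2)
    else if l == 'v' then (cont, st.2.1 - 56, st.2.2)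
    else (cont, st.2.1, st.2.2)
  else st

def ap_antes_corte (c : String) (s : String) : Int :=
  (s.toList.foldl (apAStep c) (0, 0, false)).1

-- ===== PORT B =====
-- Pass 1 of Source B: find the cutoff index, tracking only saldo.
def apFindCut (saldo : Int) : List Char → Option Nat
  | [] => none
  | l :: rest =>
    if l == 'x' || (l == 'v' && saldo < 56) then some 0
    else
      let saldo' := if l == 'r' then saldo + 350 else if l == 'v' then saldo - 56 else saldo
      (apFindCut saldo' rest).map (· + 1)

-- Pass 2 of Source B: sum(1 for l in prefix if l == c).
def apCount (c : String) : List Char → Int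
  | [] => 0
  | l :: rest => (if String.mk [l] == c then 1 else 0) + apCount c rest

def ap_antes_corte_alt (c : String) (s : String) : Int :=
  let pref :=
    match apFindCut 0 s.toList with
    | none => s.toList
    | some i => s.toList.take (i + 1)
  apCount c pref

-- ===== PRECONDITION & SPEC =====
def Spec_ap_antes_corte (c : String) (s : String) (out : Int) : Prop := out = ap_antes_corte_alt c s
instance (c : String) (s : String) (out : Int) : Decidable (Spec_ap_antes_corte c s out) := by unfold Spec_ap_antes_corte; infer_instance

-- ===== CLAIM (what is proved, stated in full; the proofs are below) =====
def Claim_equal_ap_antes_corte : Prop := ∀ (c : String) (s : String), Dom_ap_antes_corte c s → Spec_ap_antes_corte c s (ap_antes_corte c s)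

-- ===== LEMMAS AND PROOFS =====

-- B's count over the cutoff-determined prefix, as a function of the running saldo.
def bcount (c : String) (saldo : Int) (ls : List Char) : Int :=
  match apFindCut saldo ls with
  | none => apCount c ls
  | some i => apCount c (ls.take (i + 1))

theorem foldl_fin_true (c : String) (ls : List Char) (cont saldo : Int) :
    (ls.foldl (apAStep c) (cont, saldo, true)).1 = cont := by
  induction ls with
  | nil => rfl
  | cons l rest ih => simpa [apAStep] using ih

theorem loop_eq_bcount (c : String) (ls : List Char) (cont saldo : Int) :
    (ls.foldl (apAStep c) (cont, saldo, false)).1 = cont + bcount c saldo ls := by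
  induction ls generalizing cont saldo with
  | nil => simp [bcount, apFindCut, apCount]
  | cons l rest ih =>
    by_cases htrig : (l == 'x' || (l == 'v' && saldo < 56)) = true
    · have hA : apAStep c (cont, saldo, false) l
          = ((if c == String.mk [l] then cont + 1 else cont), saldo, true) := by
        simp [apAStep, htrig]
      have hmk : (String.mk [l] == c) = (c == String.mk [l]) := by
        by_cases h : String.mk [l] = c
        · subst h; simp
        · simp [h, Ne.symm h]
      simp only [List.foldl_cons, hA, foldl_fin_true, bcount, apFindCut, htrig, if_pos,
        List.take_succ_cons, List.take_zero, apCount, hmk]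
      split <;> omega
    · have saldo' := saldo
      set s' := (if l == 'r' then saldo + 350 else if l == 'v' then saldo - 56 else saldo) with hs'
      have hA : apAStep c (cont, saldo, false) l
          = ((if c == String.mk [l] then cont + 1 else cont), s', false) := by
        by_cases hr : l = 'r'
        · simp [apAStep, hs', hr]
        · by_cases hv : l = 'v'
          · subst hv; simp only [apAStep, htrig] at *; simp [hs']
          · simp [apAStep, htrig, hs', hr, hv]
      have hcut : apFindCut saldo (l :: rest) = (apFindCut s' rest).map (· + 1) := by
        simp [apFindCut, htrig, hs']
      have hmk : (String.mk [l] == c) = (c == String.mk [l]) := by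
        by_cases h : String.mk [l] = c
        · subst h; simp
        · simp [h, Ne.symm h]
      have hb : bcount c saldo (l :: rest)
          = (if c == String.mk [l] then (1:Int) else 0) + bcount c s' rest := by
        unfold bcount
        rw [hcut]
        cases h : apFindCut s' rest with
        | none => simp [apCount, hmk]
        | some i => simp [apCount, List.take_succ_cons, hmk]
      rw [List.foldl_cons, hA, ih, hb]
      split <;> omega

-- ===== VERDICT (by name: the statement is the Claim_ definition above) =====
theorem ap_antes_corte_spec : Claim_equal_ap_antes_corte := by
  intro c s _
  unfold Spec_ap_antes_corte ap_antes_corte ap_antes_corte_alt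
  rw [loop_eq_bcount, zero_add]
  unfold bcount
  cases apFindCut 0 s.toList <;> simp
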